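-- pv_equiv track=rewrite | github.com/cjc-github/android_native_code_statistics | Down_FDroid/main.py | get_last_segment
-- ===== SOURCE A (Python) =====
-- def get_last_segment(url):
--     if not url:
--         return None
--
--     segments = [segment for segment in url.split('/') if segment]
--
--     if segments:
--         return segments[-1]
--     else:
--         return None
-- ===== SOURCE B (Python) =====
-- def get_last_segment(url):
--     if not url:
--         return None
--     s = url.rstrip('/')
--     tail = s.rpartition('/')[2]
--     return tail or None
-- ===== Notes on version B (the rewrite author's own statement) =====
-- stated objective: simpler
-- what changed: B removes the split-into-list-and-filter pass: it strips trailing '/' with rstrip and takes the suffix after the last '/' with rpartition, never materialising the segment list.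
import Mathlib
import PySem

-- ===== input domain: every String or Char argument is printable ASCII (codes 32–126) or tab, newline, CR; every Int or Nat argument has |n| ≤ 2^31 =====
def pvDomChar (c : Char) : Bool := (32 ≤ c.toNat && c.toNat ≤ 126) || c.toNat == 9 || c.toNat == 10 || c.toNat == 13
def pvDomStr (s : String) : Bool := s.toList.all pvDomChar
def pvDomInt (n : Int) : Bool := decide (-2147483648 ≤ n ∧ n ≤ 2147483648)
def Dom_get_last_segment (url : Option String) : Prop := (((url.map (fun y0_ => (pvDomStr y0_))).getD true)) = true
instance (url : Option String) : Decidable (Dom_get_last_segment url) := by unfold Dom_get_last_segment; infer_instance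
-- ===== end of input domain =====

-- B replaces split-then-filter by rstrip('/') and rpartition('/') on string ends; objective: simpler (no list is built).

-- ===== PORT A =====
def get_last_segment (url : Option String) : Option String :=
  match url with
  | none => none                                     -- `if not url` (None case)
  | some u =>
    if u.toList = [] then none                       -- `if not url` (empty-string case)
    else
      -- segments = [segment for segment in url.split('/') if segment]
      let segments := (PySem.Chars.splitOn u.toList ['/']).filter (fun seg => !seg.isEmpty)
      if segments.isEmpty then none                  -- `else: return None`
      else (PySem.List.pyGet? segments (-1)).map String.ofList   -- `return segments[-1]`

-- ===== PORT B =====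
def get_last_segment_alt (url : Option String) : Option String :=
  match url with
  | none => none                                     -- `if not url` (None case)
  | some u =>
    if u.toList = [] then none                       -- `if not url` (empty-string case)
    else
      -- s = url.rstrip('/')  (hand port, exact: drop trailing '/' characters)
      let s := (u.toList.reverse.dropWhile (fun c => c == '/')).reverse
      -- tail = s.rpartition('/')[2]  (hand port, exact: suffix after the last '/')
      let tail := (s.reverse.takeWhile (fun c => c != '/')).reverse
      -- return tail or None
      if tail = [] then none else some (String.ofList tail)

-- ===== PRECONDITION & SPEC =====
def Spec_get_last_segment (url : Option String) (out : Option String) : Prop := out = get_last_segment_alt url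
instance (url : Option String) (out : Option String) : Decidable (Spec_get_last_segment url out) := by unfold Spec_get_last_segment; infer_instance

-- ===== CLAIM (what is proved, stated in full; the proofs are below) =====
def Claim_equal_get_last_segment : Prop := ∀ (url : Option String), Dom_get_last_segment url → Spec_get_last_segment url (get_last_segment url)

-- ===== LEMMAS AND PROOFS =====

-- Structural form of Python's str.split('/') (accumulator style of PySem.Chars.splitOn.go made explicit).
def mySplit (pre : List Char) : List Char → List (List Char)
  | [] => [pre]
  | c :: rest => if c = '/' then pre :: mySplit [] rest else mySplit (pre ++ [c]) rest

theorem go_eq (fuel : Nat) (l cur : List Char) (acc : List (List Char)) (h : l.length < fuel) :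
    PySem.Chars.splitOn.go ['/'] fuel l cur acc = acc.reverse ++ mySplit cur.reverse l := by
  induction fuel generalizing l cur acc with
  | zero => omega
  | succ n ih =>
    match l with
    | [] => simp only [PySem.Chars.splitOn.go]; simp [mySplit]
    | c :: rest =>
      simp only [List.length_cons, Nat.succ_lt_succ_iff] at h
      by_cases hc : c = '/'
      · subst hc
        rw [PySem.Chars.splitOn.go]
        simp only [List.isPrefixOf, Bool.and_true, beq_self_eq_true, if_true]
        rw [ih _ _ _ (by simpa using h)]
        simp [mySplit]
      · rw [PySem.Chars.splitOn.go]
        have : (['/'].isPrefixOf (c :: rest)) = false := by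
          simp [List.isPrefixOf]; intro h'; exact hc (by simpa using h'.symm)
        rw [this]
        simp only [Bool.false_eq_true, if_false]
        rw [ih _ _ _ h]
        simp [mySplit, hc]


theorem splitOn_eq (cs : List Char) : PySem.Chars.splitOn cs ['/'] = mySplit [] cs := by
  rw [PySem.Chars.splitOn, go_eq _ _ _ _ (by omega)]; simp

theorem getLastD_cons_ne_nil (x : List Char) (L : List (List Char)) (h : L ≠ []) :
    (x :: L).getLastD [] = L.getLastD [] := by
  cases L with
  | nil => exact absurd rfl h
  | cons a t => simp

theorem mySplit_ne_nil (pre cs : List Char) : mySplit pre cs ≠ [] := by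
  induction cs generalizing pre with
  | nil => simp [mySplit]
  | cons c rest ih =>
    simp only [mySplit]
    split_ifs
    · simp
    · exact ih _

-- snoc step of mySplit
theorem mySplit_snoc (cs : List Char) (pre : List Char) (c : Char) :
    mySplit pre (cs ++ [c]) =
      if c = '/' then mySplit pre cs ++ [[]]
      else (mySplit pre cs).dropLast ++ [(mySplit pre cs).getLastD [] ++ [c]] := by
  induction cs generalizing pre with
  | nil =>
    simp only [List.nil_append, mySplit]
    split_ifs <;> simp
  | cons d rest ih =>
    simp only [List.cons_append, mySplit]
    by_cases hd : d = '/'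
    · simp only [if_pos hd, ih]
      split_ifs
      · rfl
      · rw [List.dropLast_cons_of_ne_nil (mySplit_ne_nil _ _)]
        rw [getLastD_cons_ne_nil _ _ (mySplit_ne_nil _ _)]
        simp
    · simp only [if_neg hd, ih]

-- the last (possibly empty) segment is the reversed take of non-'/' chars from the end
theorem mySplit_getLastD (cs : List Char) :
    (mySplit [] cs).getLastD [] = (cs.reverse.takeWhile (fun c => c != '/')).reverse := by
  induction cs using List.reverseRecOn with
  | nil => simp [mySplit]
  | append_singleton cs c ih =>
    rw [mySplit_snoc]
    by_cases hc : c = '/'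
    · simp [hc]
    · simp only [List.reverse_append, List.reverse_cons, List.reverse_nil,
        List.nil_append, List.cons_append, List.takeWhile_cons, bne_iff_ne, ne_eq, hc,
        not_false_eq_true, if_true]
      simpa [List.getLastD_eq_getLast?] using ih

def lastNE (l : List (List Char)) : Option (List Char) := (l.filter (fun s => !s.isEmpty)).getLast?

theorem main_char (cs : List Char) :
    lastNE (mySplit [] cs) =
      (fun t => if t = [] then none else some t.reverse)
        ((cs.reverse.dropWhile (fun c => c == '/')).takeWhile (fun c => c != '/')) := by
  induction cs using List.reverseRecOn with
  | nil => simp [mySplit, lastNE]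
  | append_singleton cs c ih =>
    rw [mySplit_snoc]
    by_cases hc : c = '/'
    · simp only [if_pos hc, lastNE, List.filter_append]
      simp only [hc]
      simpa [lastNE] using ih
    · simp only [if_neg hc, lastNE, List.filter_append]
      rw [mySplit_getLastD]
      simp [hc]

-- segments[-1] is getLast?
theorem pyGet_neg_one (l : List (List Char)) (h : l ≠ []) :
    PySem.List.pyGet? l (-1) = l.getLast? := by
  have hl : 0 < l.length := List.length_pos_iff.mpr h
  simp only [PySem.List.pyGet?, PySem.List.pyIdx?]
  rw [if_neg (by omega), if_pos (by simp; omega)]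
  simp only [Option.bind_some]
  have h1 : (-(-1:Int)).toNat = 1 := rfl
  rw [h1, List.getLast?_eq_getElem?]

-- ===== VERDICT (by name: the statement is the Claim_ definition above) =====
theorem get_last_segment_spec : Claim_equal_get_last_segment := by
  intro url _
  unfold Spec_get_last_segment get_last_segment get_last_segment_alt
  match url with
  | none => rfl
  | some u =>
    by_cases hu : u.toList = []
    · simp [hu]
    · simp only [if_neg hu, List.reverse_reverse]
      rw [splitOn_eq]
      have hmain := main_char u.toList
      simp only [lastNE] at hmain
      by_cases hg : ((u.toList.reverse.dropWhile (fun c => c == '/')).takeWhile (fun c => c != '/')) = []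
      · -- all characters are '/': no non-empty segment on either side
        rw [if_pos hg] at hmain
        have hseg : ((mySplit [] u.toList).filter (fun seg => !seg.isEmpty)) = [] :=
          List.getLast?_eq_none_iff.mp hmain
        simp [hseg, hg]
      · rw [if_neg hg] at hmain
        have hseg : ((mySplit [] u.toList).filter (fun seg => !seg.isEmpty)) ≠ [] := by
          intro h; rw [h] at hmain; simp at hmain
        rw [pyGet_neg_one _ hseg, hmain]
        rw [if_neg (by simpa using hseg)]
        have hrev : ((u.toList.reverse.dropWhile (fun c => c == '/')).takeWhile (fun c => c != '/')).reverse ≠ [] := by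
          simpa using hg
        rw [if_neg hrev]
        rfl
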